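-- pv_equiv track=rewrite | github.com/facebookresearch/fairo | tools/annotation_tools/turk_with_s3/parse_tool_combined.py | insert_spaces
-- ===== SOURCE A (Python) =====
-- def insert_spaces(chat):
--     updated_chat = ""
--     for i, c in enumerate(chat):
--         # [num , (num , {num , ,num , :num
--         if (
--             (c in ["[", "(", "{", ",", ":", "x"])
--             and (i != len(chat) - 1)
--             and (chat[i + 1].isdigit())
--         ):
--             updated_chat += c + " "
--         # num, , num] , num) , num}, num:
--         # 4x -> 4 x
--         elif (
--             (c.isdigit())
--             and (i != len(chat) - 1)
--             and (chat[i + 1] in [",", "]", ")", "}", ":", "x"])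
--         ):
--             updated_chat += c + " "
--         else:
--             updated_chat += c
--
--     return updated_chat
-- ===== SOURCE B (Python) =====
-- def insert_spaces(chat):
--     DIGITS = "0123456789"
--
--     def spread(s, left, right):
--         # one rewriting stage: put a space into every gap whose left char is in
--         # `left` and right char is in `right`
--         return "".join(c + " " if c in left and n in right else c
--                        for c, n in zip(s, s[1:])) + s[-1:]
--
--     # stage 1: opener/comma/colon/'x' followed by a digit
--     # stage 2: digit followed by closer/comma/colon/'x' (stage 1's inserted
--     # spaces never create or destroy a stage-2 gap, so the stages commute
--     # with A's combined single pass)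
--     return spread(spread(chat, "[({,:x", DIGITS), DIGITS, ",])}:x")
-- ===== Notes on version B (the rewrite author's own statement) =====
-- stated objective: alternative
-- what changed: Splits A's single combined pass (indexed loop with two branch rules) into two independent rewriting stages applied one after the other - first space out opener/comma/colon/'x' before a digit over the whole string, then space out a digit before closer/comma/colon/'x' over the already-rewritten string - correct because stage 1's inserted spaces never create or destroy a stage-2 gap.
import Mathlib
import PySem

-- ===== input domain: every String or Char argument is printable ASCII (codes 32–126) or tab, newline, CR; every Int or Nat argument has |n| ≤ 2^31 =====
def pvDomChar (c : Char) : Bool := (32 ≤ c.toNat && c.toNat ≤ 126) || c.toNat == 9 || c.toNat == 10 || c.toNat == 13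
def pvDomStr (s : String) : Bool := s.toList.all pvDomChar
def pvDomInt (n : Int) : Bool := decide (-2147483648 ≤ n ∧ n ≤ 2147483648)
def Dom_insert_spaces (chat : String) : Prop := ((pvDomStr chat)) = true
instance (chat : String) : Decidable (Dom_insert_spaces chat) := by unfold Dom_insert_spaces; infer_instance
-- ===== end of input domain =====

-- B replaces A's single combined pass by two independent rewriting stages (openers-before-digit,
-- then digit-before-closers) applied one after the other — an alternative decomposition, same cost.

-- ===== PORT A =====
-- literal transliteration of A's enumerate loop with i != len-1 guard and chat[i+1] lookup
def insert_spaces (chat : String) : String :=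
  String.ofList ((PySem.List.enumerate chat.toList 0).foldl
    (fun updated ic =>
      if (ic.2 ∈ ['[', '(', '{', ',', ':', 'x']) ∧ ic.1 ≠ PySem.Str.len chat - 1 ∧
         (PySem.List.pyGetD chat.toList (ic.1 + 1) ' ').isDigit = true
      then updated ++ [ic.2, ' ']
      else if (ic.2).isDigit = true ∧ ic.1 ≠ PySem.Str.len chat - 1 ∧
         (PySem.List.pyGetD chat.toList (ic.1 + 1) ' ') ∈ [',', ']', ')', '}', ':', 'x']
      then updated ++ [ic.2, ' ']
      else updated ++ [ic.2]) [])

-- ===== PORT B =====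
-- Source B's `spread`: one rewriting stage over zip(s, s[1:]) plus s[-1:]
def spread (s : List Char) (left right : List Char) : List Char :=
  ((s.zip (PySem.List.slice s (some 1) none)).flatMap
      (fun p => if p.1 ∈ left && p.2 ∈ right then [p.1, ' '] else [p.1]))
    ++ PySem.List.slice s (some (-1)) none

-- stage 1 (opener/comma/colon/x before digit) then stage 2 (digit before closer/comma/colon/x)
def insert_spaces_alt (chat : String) : String :=
  String.ofList (spread (spread chat.toList "[({,:x".toList "0123456789".toList)
    "0123456789".toList ",])}:x".toList)

-- ===== PRECONDITION & SPEC =====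
def Spec_insert_spaces (chat : String) (out : String) : Prop := out = insert_spaces_alt chat
instance (chat : String) (out : String) : Decidable (Spec_insert_spaces chat out) := by unfold Spec_insert_spaces; infer_instance

-- ===== CLAIM (what is proved, stated in full; the proofs are below) =====
def Claim_equal_insert_spaces : Prop := ∀ (chat : String), Dom_insert_spaces chat → Spec_insert_spaces chat (insert_spaces chat)

-- ===== LEMMAS AND PROOFS =====

-- the two stage predicates and their combination (A's per-gap decision)
def gap1 (c n : Char) : Bool := c ∈ "[({,:x".toList && n ∈ "0123456789".toList
def gap2 (c n : Char) : Bool := c ∈ "0123456789".toList && n ∈ ",])}:x".toList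

lemma isDigit_eq_mem (c : Char) : c.isDigit = (c ∈ "0123456789".toList) := by
  show _ = (c ∈ ['0','1','2','3','4','5','6','7','8','9'])
  rcases c with ⟨v, hv⟩
  simp only [Char.isDigit, List.mem_cons, List.not_mem_nil, or_false, Char.ext_iff,
    ge_iff_le, decide_eq_true_eq, Bool.and_eq_true, UInt32.le_iff_toNat_le,
    ← UInt32.toNat_inj, eq_iff_iff]
  have h0 : ('0' : Char).val.toNat = 48 := rfl
  have h1 : ('1' : Char).val.toNat = 49 := rfl
  have h2 : ('2' : Char).val.toNat = 50 := rfl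
  have h3 : ('3' : Char).val.toNat = 51 := rfl
  have h4 : ('4' : Char).val.toNat = 52 := rfl
  have h5 : ('5' : Char).val.toNat = 53 := rfl
  have h6 : ('6' : Char).val.toNat = 54 := rfl
  have h7 : ('7' : Char).val.toNat = 55 := rfl
  have h8 : ('8' : Char).val.toNat = 56 := rfl
  have h9 : ('9' : Char).val.toNat = 57 := rfl
  rw [h0, h1, h2, h3, h4, h5, h6, h7, h8, h9]
  omega

-- a single stage as structural recursion over the characters
def zRec (pred : Char → Char → Bool) : List Char → List Char
  | [] => []
  | [c] => [c]
  | c :: n :: rest => (if pred c n then [c, ' '] else [c]) ++ zRec pred (n :: rest)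

-- A's whole pass as structural recursion
def aRec : List Char → List Char
  | [] => []
  | [c] => [c]
  | c :: n :: rest => (if gap1 c n || gap2 c n then [c, ' '] else [c]) ++ aRec (n :: rest)

-- A's loop body as a function of (index, char), over the full char list
def fA (full : List Char) (ic : Int × Char) : List Char :=
  if (ic.2 ∈ ['[', '(', '{', ',', ':', 'x']) ∧ ic.1 ≠ (full.length : Int) - 1 ∧
     (PySem.List.pyGetD full (ic.1 + 1) ' ').isDigit = true
  then [ic.2, ' ']
  else if (ic.2).isDigit = true ∧ ic.1 ≠ (full.length : Int) - 1 ∧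
     (PySem.List.pyGetD full (ic.1 + 1) ' ') ∈ [',', ']', ')', '}', ':', 'x']
  then [ic.2, ' ']
  else [ic.2]

lemma keyA : ∀ (cs pre : List Char),
    (PySem.List.enumerate cs (pre.length : Int)).flatMap (fA (pre ++ cs)) = aRec cs := by
  intro cs
  induction cs with
  | nil => intro pre; simp [aRec]
  | cons c rest ih =>
    intro pre
    rw [PySem.List.enumerate_cons]
    simp only [List.flatMap_cons]
    have htail : (PySem.List.enumerate rest ((pre.length : Int) + 1)).flatMap
        (fA (pre ++ c :: rest)) = aRec rest := by
      have h := ih (pre ++ [c])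
      simp only [List.append_assoc, List.singleton_append, List.length_append,
        List.length_singleton, Nat.cast_add, Nat.cast_one] at h
      exact h
    rw [htail]
    cases rest with
    | nil =>
      show fA (pre ++ [c]) ((pre.length : Int), c) ++ aRec [] = aRec [c]
      have h1 : ¬ ((pre.length : Int) ≠ ((pre ++ [c]).length : Int) - 1) := by
        simp
      simp only [fA, aRec]
      rw [if_neg (by rintro ⟨-, h, -⟩; exact h1 h), if_neg (by rintro ⟨-, h, -⟩; exact h1 h)]
      simp
    | cons n rest' =>
      have hget : PySem.List.pyGetD (pre ++ c :: n :: rest') ((pre.length : Int) + 1) ' ' = n := by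
        have hc : ((pre.length : Int) + 1) = ((pre.length + 1 : Nat) : Int) := by push_cast; ring
        rw [hc, PySem.List.pyGetD_natCast]
        simp [List.getD]
      have hg : (pre.length : Int) ≠ (((pre ++ c :: n :: rest').length : Int)) - 1 := by
        simp; omega
      have hs1 : "[({,:x".toList = ['[', '(', '{', ',', ':', 'x'] := rfl
      have hs2 : ",])}:x".toList = [',', ']', ')', '}', ':', 'x'] := rfl
      have hs3 : "0123456789".toList = ['0','1','2','3','4','5','6','7','8','9'] := rfl
      show fA (pre ++ c :: n :: rest') ((pre.length : Int), c) ++ aRec (n :: rest')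
          = aRec (c :: n :: rest')
      have hfa : fA (pre ++ c :: n :: rest') ((pre.length : Int), c)
          = if gap1 c n || gap2 c n then [c, ' '] else [c] := by
        simp only [fA, hget, gap1, gap2, hs1, hs2, hs3, isDigit_eq_mem]
        have hlen : ¬ ((pre.length : Int)) = (pre.length : Int) + ((rest'.length : Int) + 1 + 1) - 1 := by
          omega
        by_cases h1 : c ∈ ['[', '(', '{', ',', ':', 'x'] <;>
          by_cases h2 : n ∈ ['0','1','2','3','4','5','6','7','8','9'] <;>
          by_cases h3 : c ∈ ['0','1','2','3','4','5','6','7','8','9'] <;>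
          by_cases h4 : n ∈ [',', ']', ')', '}', ':', 'x'] <;>
          simp only [List.mem_cons, List.not_mem_nil, or_false] at h1 h2 h3 h4 <;>
          simp [h1, h2, h3, h4, hlen]
      rw [hfa]; rfl

lemma portA_eq (chat : String) :
    insert_spaces chat = String.ofList (aRec chat.toList) := by
  unfold insert_spaces
  have hbody : (fun (updated : List Char) (ic : Int × Char) =>
      if (ic.2 ∈ ['[', '(', '{', ',', ':', 'x']) ∧ ic.1 ≠ PySem.Str.len chat - 1 ∧
         (PySem.List.pyGetD chat.toList (ic.1 + 1) ' ').isDigit = true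
      then updated ++ [ic.2, ' ']
      else if (ic.2).isDigit = true ∧ ic.1 ≠ PySem.Str.len chat - 1 ∧
         (PySem.List.pyGetD chat.toList (ic.1 + 1) ' ') ∈ [',', ']', ')', '}', ':', 'x']
      then updated ++ [ic.2, ' ']
      else updated ++ [ic.2])
      = (fun updated ic => updated ++ fA chat.toList ic) := by
    funext u ic
    simp only [fA, PySem.Str.len_eq]
    split_ifs <;> rfl
  rw [hbody, PySem.List.foldl_append_eq_flatMap]
  have h := keyA chat.toList []
  simp only [List.length_nil, Nat.cast_zero, List.nil_append] at h
  rw [List.nil_append, h]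

-- each spread stage equals its structural recursion
lemma spread_eq (pred : Char → Char → Bool) (left right : List Char)
    (hp : ∀ c n, (c ∈ left && n ∈ right) = pred c n) :
    ∀ (cs : List Char), spread cs left right = zRec pred cs := by
  intro cs
  unfold spread
  simp only [PySem.List.slice_from_one]
  induction cs with
  | nil => simp [zRec, PySem.List.slice]
  | cons c rest ih =>
    cases rest with
    | nil => simp [zRec, PySem.List.slice_from_neg_one]
    | cons n rest' =>
      rw [PySem.List.slice_from_neg_one] at ih ⊢
      show ((if c ∈ left && n ∈ right then [c, ' '] else [c]) ++
          ((n :: rest').zip rest').flatMap (fun p => if p.1 ∈ left && p.2 ∈ right then [p.1, ' '] else [p.1]))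
          ++ (c :: n :: rest').drop ((c :: n :: rest').length - 1) = zRec pred (c :: n :: rest')
      have hdrop : (c :: n :: rest').drop ((c :: n :: rest').length - 1)
          = (n :: rest').drop ((n :: rest').length - 1) := by
        simp [List.length_cons]
      simp only [List.tail_cons] at ih
      rw [hdrop, List.append_assoc, ih, hp]
      rfl

-- every stage keeps the first character
lemma zRec_head (pred : Char → Char → Bool) (n : Char) (r : List Char) :
    ∃ t, zRec pred (n :: r) = n :: t := by
  cases r with
  | nil => exact ⟨[], rfl⟩
  | cons m r' =>
    refine ⟨(if pred n m then [' '] else []) ++ zRec pred (m :: r'), ?_⟩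
    show (if pred n m then [n, ' '] else [n]) ++ zRec pred (m :: r') = _
    split_ifs <;> rfl

-- stage 2 after stage 1 equals A's combined single pass
lemma stages_eq : ∀ (cs : List Char), zRec gap2 (zRec gap1 cs) = aRec cs := by
  intro cs
  induction cs with
  | nil => rfl
  | cons c rest ih =>
    cases rest with
    | nil => rfl
    | cons n r =>
      obtain ⟨t, ht⟩ := zRec_head gap1 n r
      by_cases h1 : gap1 c n
      · -- stage 1 inserts; neither new gap (c,' ') nor (' ',n) fires in stage 2
        have hz1 : zRec gap1 (c :: n :: r) = c :: ' ' :: n :: t := by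
          show (if gap1 c n then [c, ' '] else [c]) ++ zRec gap1 (n :: r) = _
          rw [if_pos h1, ht]; rfl
        have hc : gap2 c ' ' = false := by simp [gap2]
        have hsp : gap2 ' ' n = false := by simp [gap2]
        rw [hz1]
        show (if gap2 c ' ' then [c, ' '] else [c]) ++
            ((if gap2 ' ' n then [' ', ' '] else [' ']) ++ zRec gap2 (n :: t)) = aRec (c :: n :: r)
        rw [hc, hsp, ← ht, ih]
        show c :: ' ' :: aRec (n :: r)
            = (if gap1 c n || gap2 c n then [c, ' '] else [c]) ++ aRec (n :: r)
        rw [if_pos (by rw [h1]; rfl : (gap1 c n || gap2 c n) = true)]; rfl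
      · -- stage 1 leaves the gap; stage 2 sees the original pair (c, n)
        have hz1 : zRec gap1 (c :: n :: r) = c :: n :: t := by
          show (if gap1 c n then [c, ' '] else [c]) ++ zRec gap1 (n :: r) = _
          rw [if_neg h1, ht]; rfl
        rw [hz1]
        show (if gap2 c n then [c, ' '] else [c]) ++ zRec gap2 (n :: t) = aRec (c :: n :: r)
        rw [← ht, ih]
        have hcomb : (gap1 c n || gap2 c n) = gap2 c n := by
          simp only [Bool.not_eq_true] at h1; rw [h1, Bool.false_or]
        show _ = (if gap1 c n || gap2 c n then [c, ' '] else [c]) ++ aRec (n :: r)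
        rw [hcomb]

-- ===== VERDICT (by name: the statement is the Claim_ definition above) =====
theorem insert_spaces_spec : Claim_equal_insert_spaces := by
  intro chat _
  show _ = _
  rw [portA_eq, insert_spaces_alt,
    spread_eq gap1 _ _ (fun _ _ => rfl),
    spread_eq gap2 _ _ (fun _ _ => rfl),
    stages_eq]
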